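-- pv_equiv track=rewrite | github.com/MHovenkamp/ATP | compiler_base.py | getFoundFuncsOffsetDict
-- ===== SOURCE A (Python) =====
-- from typing import List, TypeVar, Union, Tuple
-- import copy
--
-- def getFoundFuncsOffsetDict( found_funcs : List[str], main_fileName : str, new_dict : dict = {}, counter : int = 0 ) -> dict:
--     """get offset dictionaty for function line numbers, main code : 0 based, first func 100 + line nr etc.
--
--     Args:
--         found_funcs (List[str]): al found functions in code
--         main_fileName (str): name of the code file
--         new_dict (dict, optional): dictionary that hods offset, name func = key. Defaults to {}.
--         counter (int, optional): counter at which offset we are. Defaults to 0.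
--
--     Returns:
--         dict: dictionary containing function offset
--     """
--     found_funcs_copy = copy.copy(found_funcs)
--     new_dict_copy = copy.copy(new_dict)
--     counter_copy = copy.copy(counter)
--     if len( new_dict_copy ) == 0:
--         new_dict_copy[main_fileName] = counter_copy
--
--     if len(found_funcs_copy) == 0:
--         return new_dict
--
--     head, *tail = found_funcs_copy
--     if(type(head) is not str):
--         new_dict_copy[(head.value)] = counter
--     else:
--         new_dict_copy[(head)] = counter
--     return getFoundFuncsOffsetDict( tail, main_fileName ,new_dict_copy, counter_copy+100)
-- ===== SOURCE B (Python) =====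
-- import copy
-- from typing import List
--
-- def getFoundFuncsOffsetDict(found_funcs: List[str], main_fileName: str, new_dict: dict = {}, counter: int = 0) -> dict:
--     # Single iterative pass instead of one dict copy per recursive frame.
--     if len(found_funcs) == 0:
--         return new_dict
--     result = copy.copy(new_dict)
--     if len(result) == 0:
--         result[main_fileName] = counter
--     for i, head in enumerate(found_funcs):
--         key = head if type(head) is str else head.value
--         result[key] = counter + 100 * i
--     return result
-- ===== Notes on version B (the rewrite author's own statement) =====
-- stated objective: simpler
-- what changed: Replaced the tail recursion (which copies the dict once per element and re-checks emptiness at every level) by a single iterative pass over enumerate(found_funcs) writing counter+100*i into one dict copy.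
import Mathlib
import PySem

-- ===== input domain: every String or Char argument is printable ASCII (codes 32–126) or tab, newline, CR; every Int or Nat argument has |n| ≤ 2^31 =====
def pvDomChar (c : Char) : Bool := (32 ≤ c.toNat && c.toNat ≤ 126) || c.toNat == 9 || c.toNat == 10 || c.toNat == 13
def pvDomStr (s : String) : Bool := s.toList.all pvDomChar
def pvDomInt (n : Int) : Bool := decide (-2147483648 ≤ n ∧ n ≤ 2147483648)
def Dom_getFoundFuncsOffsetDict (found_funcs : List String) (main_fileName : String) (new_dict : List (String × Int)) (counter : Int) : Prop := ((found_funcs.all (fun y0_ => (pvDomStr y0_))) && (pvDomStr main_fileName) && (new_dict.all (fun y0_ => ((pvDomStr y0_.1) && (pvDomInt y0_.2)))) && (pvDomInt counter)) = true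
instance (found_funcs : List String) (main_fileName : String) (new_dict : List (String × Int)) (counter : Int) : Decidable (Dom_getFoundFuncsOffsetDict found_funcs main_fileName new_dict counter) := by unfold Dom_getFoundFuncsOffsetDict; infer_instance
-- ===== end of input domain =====

-- B replaces A's tail recursion (one dict copy per frame) by a single iterative pass
-- over enumerate(found_funcs); objective: simpler.

-- ===== PORT A =====
-- literal transliteration of A's recursion; copy.copy is identity on immutable Lean values
def goA_getFoundFuncsOffsetDict (found_funcs : List String) (main_fileName : String)
    (new_dict : PySem.Dict String Int) (counter : Int) : PySem.Dict String Int :=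
  let new_dict_copy :=
    if new_dict.size == 0 then new_dict.insert main_fileName counter else new_dict
  match found_funcs with
  | [] => new_dict           -- returns the ORIGINAL new_dict, without the main_fileName insertion
  | head :: tail =>
      -- head is always a str here (type convention), so the `.value` branch is dead
      goA_getFoundFuncsOffsetDict tail main_fileName (new_dict_copy.insert head counter) (counter + 100)

def getFoundFuncsOffsetDict (found_funcs : List String) (main_fileName : String) (new_dict : List (String × Int)) (counter : Int) : List (String × Int) :=
  (goA_getFoundFuncsOffsetDict found_funcs main_fileName (PySem.Dict.ofList new_dict) counter).items

-- ===== PORT B =====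
def getFoundFuncsOffsetDict_alt (found_funcs : List String) (main_fileName : String) (new_dict : List (String × Int)) (counter : Int) : List (String × Int) :=
  let d := PySem.Dict.ofList new_dict
  if found_funcs.length == 0 then d.items
  else
    let result := if d.size == 0 then d.insert main_fileName counter else d
    ((PySem.List.enumerate found_funcs).foldl
      (fun r p => r.insert p.2 (counter + 100 * p.1)) result).items

-- ===== PRECONDITION & SPEC =====
def Spec_getFoundFuncsOffsetDict (found_funcs : List String) (main_fileName : String) (new_dict : List (String × Int)) (counter : Int) (out : List (String × Int)) : Prop := out = getFoundFuncsOffsetDict_alt found_funcs main_fileName new_dict counter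
instance (found_funcs : List String) (main_fileName : String) (new_dict : List (String × Int)) (counter : Int) (out : List (String × Int)) : Decidable (Spec_getFoundFuncsOffsetDict found_funcs main_fileName new_dict counter out) := by unfold Spec_getFoundFuncsOffsetDict; infer_instance

-- ===== CLAIM (what is proved, stated in full; the proofs are below) =====
def Claim_equal_getFoundFuncsOffsetDict : Prop := ∀ (found_funcs : List String) (main_fileName : String) (new_dict : List (String × Int)) (counter : Int), Dom_getFoundFuncsOffsetDict found_funcs main_fileName new_dict counter → Spec_getFoundFuncsOffsetDict found_funcs main_fileName new_dict counter (getFoundFuncsOffsetDict found_funcs main_fileName new_dict counter)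

-- ===== LEMMAS AND PROOFS =====

theorem size_insert_ne_zero (d : PySem.Dict String Int) (k : String) (v : Int) :
    (d.insert k v).size ≠ 0 := by
  have h := PySem.Dict.size_insert d k v
  by_cases hc : d.contains k = true
  · have hk : k ∈ d.keys := (PySem.Dict.contains_iff_mem_keys d k).mp hc
    have hp := List.length_pos_of_mem hk
    have hs : d.keys.length = d.size := by simp [PySem.Dict.keys, PySem.Dict.size]
    simp [hc] at h
    omega
  · simp [hc] at h
    omega

-- main invariant: on a nonempty dict the recursion computes exactly B's enumerate-fold
theorem goA_eq_fold (t : List String) (main : String) :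
    ∀ (d : PySem.Dict String Int) (c s : Int), d.size ≠ 0 →
    goA_getFoundFuncsOffsetDict t main d (c + 100 * s) =
      (PySem.List.enumerate t s).foldl (fun r p => r.insert p.2 (c + 100 * p.1)) d := by
  induction t with
  | nil => intro d c s hd; simp [goA_getFoundFuncsOffsetDict, PySem.List.enumerate_nil]
  | cons h t ih =>
      intro d c s hd
      have hne : (d.size == 0) = false := by simpa using hd
      have key : c + 100 * s + 100 = c + 100 * (s + 1) := by ring
      rw [goA_getFoundFuncsOffsetDict, PySem.List.enumerate_cons]
      simp only [hne, Bool.false_eq_true, if_false, List.foldl_cons, key]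
      exact ih (d.insert h (c + 100 * s)) c (s + 1) (size_insert_ne_zero d h (c + 100 * s))

-- ===== VERDICT (by name: the statement is the Claim_ definition above) =====
theorem getFoundFuncsOffsetDict_spec : Claim_equal_getFoundFuncsOffsetDict := by
  intro ffs main nd c _
  unfold Spec_getFoundFuncsOffsetDict getFoundFuncsOffsetDict getFoundFuncsOffsetDict_alt
  cases ffs with
  | nil => simp [goA_getFoundFuncsOffsetDict]
  | cons h t =>
      simp only [List.length_cons]
      rw [goA_getFoundFuncsOffsetDict, PySem.List.enumerate_cons]
      set d := PySem.Dict.ofList nd with hdd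
      set r0 := if d.size == 0 then d.insert main c else d with hr0
      have hr0' : (if (d.size == 0) = true then d.insert main c else d) = r0 := hr0.symm
      have hc : c + 100 * (0 : Int) = c := by ring
      have key := goA_eq_fold t main (r0.insert h c) c 1 (size_insert_ne_zero r0 h c)
      simp only [List.foldl_cons, hc, hr0'] at *
      have h100 : c + 100 = c + 100 * (1 : Int) := by ring
      have h01 : ((0 : Int) + 1) = 1 := by norm_num
      rw [h100, key, h01]
      split_ifs with hz
      · simp at hz
      · rfl
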